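-- pv_equiv track=rewrite | github.com/bj0key/snuscode | encode.py | snus_legacy
-- ===== SOURCE A (Python) =====
-- def snus_legacy(msg):
--     """encode to legacy snuscode"""
--     enc = ""
--     for c in msg:
--         # For each char, encode into a 5-digit ternary 'number'
--         n = ord(c)
--         w = ""
--         for i in range(5):
--             d, r = divmod(n, 3)
--             w += "snu"[r]
--             n = d
--         enc += w[::-1]
--     return(enc)
-- ===== SOURCE B (Python) =====
-- def snus_legacy(msg):
--     """encode to legacy snuscode (MSB-first by place value, joined once)"""
--     digits = []
--     for c in msg:
--         n = ord(c)
--         for p in (81, 27, 9, 3, 1):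
--             digits.append("snu"[n // p % 3])
--     return "".join(digits)
-- ===== Notes on version B (the rewrite author's own statement) =====
-- stated objective: simpler
-- what changed: B emits each character's five ternary digits MSB-first by place value (n // p % 3 for p in (81,27,9,3,1)), appending into one flat list joined once, instead of A's LSB-first divmod loop that builds a per-char string, reverses it, and concatenates strings. (flat list + single join avoids quadratic-ish repeated string concatenation and the per-char reversal)
import Mathlib
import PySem

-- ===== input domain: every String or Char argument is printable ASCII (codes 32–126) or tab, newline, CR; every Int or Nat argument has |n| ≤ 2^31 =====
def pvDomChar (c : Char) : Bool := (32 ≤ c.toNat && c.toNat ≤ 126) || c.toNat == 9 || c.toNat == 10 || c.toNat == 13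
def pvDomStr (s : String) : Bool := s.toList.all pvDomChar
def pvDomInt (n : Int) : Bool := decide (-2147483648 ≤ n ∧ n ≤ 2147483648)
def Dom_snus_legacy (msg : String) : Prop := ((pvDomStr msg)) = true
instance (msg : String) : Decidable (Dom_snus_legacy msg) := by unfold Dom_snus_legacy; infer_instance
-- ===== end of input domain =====

-- B re-encodes each char MSB-first by place value ((81,27,9,3,1) with n // p % 3), so the
-- per-char reversal of A disappears; objective: simpler (no inner reversal, one final join).

-- "snu"[r] — r ∈ {0,1,2} in both programs (r is a mod-3 of a nonnegative int), so pyGet? is never none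
def snuGet (r : Int) : String :=
  match PySem.Str.pyGet? "snu" r with
  | some ch => String.ofList [ch]
  | none => ""

-- ===== PORT A =====
-- loop body of A's outer 'for c in msg' (inner loop: for i in range(5): d,r = divmod(n,3); w += "snu"[r]; n = d)
def aStep (enc : String) (c : Char) : String :=
  let st := (PySem.List.pyRange 0 5 1).foldl
    (fun (st : Int × String) _ =>
      (PySem.Int.floordiv st.1 3, st.2 ++ snuGet (PySem.Int.mod st.1 3)))
    (((c.toNat : Int)), "")
  enc ++ String.ofList st.2.toList.reverse   -- enc += w[::-1] (exact: reverses the character list)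

def snus_legacy (msg : String) : String :=
  msg.toList.foldl aStep ""

-- ===== PORT B =====
-- loop body of B's outer loop: for p in (81,27,9,3,1): digits.append("snu"[n // p % 3])
def bStep (digits : List String) (c : Char) : List String :=
  ([81, 27, 9, 3, 1] : List Int).foldl
    (fun ds p => ds ++ [snuGet (PySem.Int.mod (PySem.Int.floordiv ((c.toNat : Int)) p) 3)])
    digits

def snus_legacy_alt (msg : String) : String :=
  PySem.Str.join "" (msg.toList.foldl bStep [])   -- "".join(digits)

-- ===== PRECONDITION & SPEC =====
def Spec_snus_legacy (msg : String) (out : String) : Prop := out = snus_legacy_alt msg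
instance (msg : String) (out : String) : Decidable (Spec_snus_legacy msg out) := by unfold Spec_snus_legacy; infer_instance

-- ===== CLAIM (what is proved, stated in full; the proofs are below) =====
def Claim_equal_snus_legacy : Prop := ∀ (msg : String), Dom_snus_legacy msg → Spec_snus_legacy msg (snus_legacy msg)

-- ===== LEMMAS AND PROOFS =====

lemma aStep_split (enc : String) (c : Char) : aStep enc c = enc ++ aStep "" c := by
  simp [aStep]

lemma bStep_split (ds : List String) (c : Char) : bStep ds c = ds ++ bStep [] c := by
  simp [bStep, List.foldl]

lemma inter_nil (xs : List (List Char)) : [].intercalate xs = xs.flatten := by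
  induction xs with
  | nil => rfl
  | cons x xs ih => cases xs <;> simp_all [List.intercalate, List.intersperse]

lemma join_empty_append (xs ys : List String) :
    PySem.Str.join "" (xs ++ ys) = PySem.Str.join "" xs ++ PySem.Str.join "" ys := by
  simp [PySem.Str.join, PySem.Chars.join, inter_nil]

set_option maxRecDepth 40000 in
lemma chunk_eq_nat : ∀ m : Nat, m < 127 →
    PySem.Str.join "" (bStep [] (Char.ofNat m)) = aStep "" (Char.ofNat m) := by
  decide

lemma chunk_eq : ∀ c : Char, c.toNat < 127 →
    PySem.Str.join "" (bStep [] c) = aStep "" c := by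
  intro c hc
  have := chunk_eq_nat c.toNat hc
  rwa [Char.ofNat_toNat] at this

lemma fold_eq : ∀ (l : List Char) (enc : String) (ds : List String),
    l.all pvDomChar = true →
    PySem.Str.join "" ds = enc →
    PySem.Str.join "" (l.foldl bStep ds) = l.foldl aStep enc := by
  intro l
  induction l with
  | nil => intro enc ds _ h; simpa using h
  | cons c l ih =>
    intro enc ds hall h
    simp only [List.all_cons, Bool.and_eq_true] at hall
    have hc : c.toNat < 127 := by
      simp [pvDomChar] at hall
      omega
    simp only [List.foldl_cons]
    apply ih _ _ hall.2
    rw [bStep_split, join_empty_append, h, chunk_eq c hc]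
    exact (aStep_split enc c).symm

-- ===== VERDICT (by name: the statement is the Claim_ definition above) =====
theorem snus_legacy_spec : Claim_equal_snus_legacy := by
  intro msg hdom
  unfold Spec_snus_legacy snus_legacy snus_legacy_alt
  exact (fold_eq msg.toList "" [] hdom (by simp [PySem.Str.join])).symm
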